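-- pv_equiv track=rewrite | github.com/quran/ayah-detection | ayat/ayat.py | process
-- ===== SOURCE A (Python) =====
-- def process(ayat):
--     result = []
--     cur_y = ayat[0][1]
--     same_line = []
--     for ayah in ayat:
--         if abs(ayah[1] - cur_y) < 20:
--             same_line.append(ayah)
--         else:
--             same_line.sort(key=lambda tup: tup[0])
--             for s in same_line[::-1]:
--                 result.append(s)
--             cur_y = ayah[1]
--             same_line = [ayah]
--
--     same_line.sort(key=lambda tup: tup[0])
--     for s in same_line[::-1]:
--         result.append(s)
--     return result
-- ===== SOURCE B (Python) =====
-- def process(ayat):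
--     result = []
--     n = len(ayat)
--     i = 0
--     while i < n:
--         y = ayat[i][1]
--         j = i + 1
--         while j < n and abs(ayat[j][1] - y) < 20:
--             j += 1
--         result += sorted(ayat[i:j], key=lambda t: t[0])[::-1]
--         i = j
--     return result
-- ===== Notes on version B (the rewrite author's own statement) =====
-- stated objective: alternative
-- what changed: B is a two-pointer index scan: an outer loop per line-group whose inner scan advances j to the group's end, then emits ayat[i:j] sorted and reversed in one step, instead of A's per-element loop maintaining a mutable same_line buffer with an inline flush duplicated after the loop.
import Mathlib
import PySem

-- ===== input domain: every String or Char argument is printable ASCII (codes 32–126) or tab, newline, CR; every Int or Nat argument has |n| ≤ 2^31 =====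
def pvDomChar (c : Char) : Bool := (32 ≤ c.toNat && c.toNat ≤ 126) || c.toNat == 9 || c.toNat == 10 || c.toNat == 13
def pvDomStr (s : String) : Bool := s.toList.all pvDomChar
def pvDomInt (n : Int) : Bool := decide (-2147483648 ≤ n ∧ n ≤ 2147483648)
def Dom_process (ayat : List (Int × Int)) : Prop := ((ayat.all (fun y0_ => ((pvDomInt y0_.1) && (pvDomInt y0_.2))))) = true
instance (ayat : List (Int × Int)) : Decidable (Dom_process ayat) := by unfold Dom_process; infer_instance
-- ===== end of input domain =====

-- B replaces A's per-element buffer-and-flush loop by a two-pointer index scan over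
-- line groups (objective: alternative, same cost); equivalence of return values only.

-- ===== PORT A =====
-- same_line.sort(key=lambda tup: tup[0]) followed by appending same_line[::-1]
def pvFlush (sameLine : List (Int × Int)) : List (Int × Int) :=
  (PySem.List.sorted sameLine (fun t => t.1) false).reverse

def processLoop (rest : List (Int × Int)) (result : List (Int × Int))
    (curY : Int) (sameLine : List (Int × Int)) : List (Int × Int) :=
  match rest with
  | [] => result ++ pvFlush sameLine
  | a :: rest =>
    if |a.2 - curY| < 20 then
      processLoop rest result curY (sameLine ++ [a])
    else
      processLoop rest (result ++ pvFlush sameLine) a.2 [a]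

def process (ayat : List (Int × Int)) : List (Int × Int) :=
  match ayat with
  | [] => []   -- unreachable: Python raises IndexError here; excluded by Pre_process
  | a0 :: _ => processLoop ayat [] a0.2 []

-- ===== PORT B =====
-- inner `while j < n and abs(ayat[j][1] - y) < 20: j += 1`
-- (the getD default (0,0) is never read: the guard forces j < ayat.length)
def innerScan (ayat : List (Int × Int)) (y : Int) (j : Nat) : Nat :=
  if _h : j < ayat.length ∧ |(ayat.getD j (0, 0)).2 - y| < 20 then
    innerScan ayat y (j + 1)
  else j
termination_by ayat.length - j
decreasing_by omega

theorem innerScan_ge (ayat : List (Int × Int)) (y : Int) (j : Nat) :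
    j ≤ innerScan ayat y j := by
  fun_induction innerScan ayat y j with
  | case1 j h ih => omega
  | case2 j h => exact le_refl j

-- outer `while i < n:` loop; ayat[i:j] with 0 ≤ i ≤ j is (ayat.drop i).take (j - i) (exact here)
def outerLoop (ayat : List (Int × Int)) (i : Nat) (result : List (Int × Int)) :
    List (Int × Int) :=
  if h : i < ayat.length then
    let j := innerScan ayat ((ayat.getD i (0, 0)).2) (i + 1)
    outerLoop ayat j
      (result ++ (PySem.List.sorted ((ayat.drop i).take (j - i)) (fun t => t.1) false).reverse)
  else result
termination_by ayat.length - i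
decreasing_by have := innerScan_ge ayat ((ayat.getD i (0, 0)).2) (i + 1); omega

def process_alt (ayat : List (Int × Int)) : List (Int × Int) :=
  outerLoop ayat 0 []

-- ===== PRECONDITION & SPEC =====
-- Pre_ excludes only the empty list, on which A raises IndexError at ayat[0].
def Pre_process (ayat : List (Int × Int)) : Prop := ayat ≠ []
instance (ayat : List (Int × Int)) : Decidable (Pre_process ayat) := by
  unfold Pre_process; infer_instance
def pvWitness_process : (List (Int × Int)) := [(1, 2), (3, 4), (5, 40)]

def Spec_process (ayat : List (Int × Int)) (out : List (Int × Int)) : Prop := out = process_alt ayat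
instance (ayat : List (Int × Int)) (out : List (Int × Int)) : Decidable (Spec_process ayat out) := by unfold Spec_process; infer_instance

-- ===== CLAIM (what is proved, stated in full; the proofs are below) =====
def Claim_equal_process : Prop := ∀ (ayat : List (Int × Int)), Dom_process ayat → Pre_process ayat → Spec_process ayat (process ayat)

-- ===== LEMMAS AND PROOFS =====

-- the Bool form of the line predicate, shared by the proof-side span recursion
def pLine (y : Int) (b : Int × Int) : Bool := decide (|b.2 - y| < 20)

-- proof-side common form: recursion on line spans
def spanRec (ayat : List (Int × Int)) : List (Int × Int) :=
  match ayat with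
  | [] => []
  | a :: t =>
    pvFlush (a :: t.takeWhile (pLine a.2)) ++ spanRec (t.dropWhile (pLine a.2))
termination_by ayat.length
decreasing_by
  have := List.length_dropWhile_le (pLine a.2) t
  simp; omega

theorem take_len_takeWhile {α : Type} (p : α → Bool) (l : List α) :
    l.take (l.takeWhile p).length = l.takeWhile p := by
  calc l.take (l.takeWhile p).length
      = (l.takeWhile p ++ l.dropWhile p).take (l.takeWhile p).length := by
        rw [List.takeWhile_append_dropWhile]
    _ = l.takeWhile p := List.take_left

theorem drop_len_takeWhile {α : Type} (p : α → Bool) (l : List α) :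
    l.drop (l.takeWhile p).length = l.dropWhile p := by
  calc l.drop (l.takeWhile p).length
      = (l.takeWhile p ++ l.dropWhile p).drop (l.takeWhile p).length := by
        rw [List.takeWhile_append_dropWhile]
    _ = l.dropWhile p := List.drop_left

theorem innerScan_eq (ayat : List (Int × Int)) (y : Int) (j : Nat) :
    innerScan ayat y j = j + ((ayat.drop j).takeWhile (pLine y)).length := by
  fun_induction innerScan ayat y j with
  | case1 j h ih =>
    obtain ⟨hj, habs⟩ := h
    rw [ih, List.drop_eq_getElem_cons hj, List.takeWhile_cons]
    have : pLine y ayat[j] = true := by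
      simp only [pLine, decide_eq_true_eq]
      rwa [List.getD_eq_getElem ayat (0, 0) hj] at habs
    simp [this]; omega
  | case2 j h =>
    by_cases hj : j < ayat.length
    · have habs : ¬ |(ayat.getD j (0, 0)).2 - y| < 20 := fun hc => h ⟨hj, hc⟩
      rw [List.drop_eq_getElem_cons hj, List.takeWhile_cons]
      have : pLine y ayat[j] = false := by
        simp only [pLine, decide_eq_false_iff_not]
        rwa [List.getD_eq_getElem ayat (0, 0) hj] at habs
      simp [this]
    · rw [List.drop_eq_nil_of_le (by omega)]; simp

theorem outerLoop_eq (ayat : List (Int × Int)) (i : Nat) (result : List (Int × Int)) :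
    outerLoop ayat i result = result ++ spanRec (ayat.drop i) := by
  fun_induction outerLoop ayat i result with
  | case1 i result h j ih =>
    rw [ih]
    have hdrop : ayat.drop i = ayat[i] :: ayat.drop (i + 1) := List.drop_eq_getElem_cons h
    have hy : (ayat.getD i (0, 0)).2 = (ayat[i]).2 := by
      rw [List.getD_eq_getElem ayat (0, 0) h]
    have hj0 : j = (i + 1) + ((ayat.drop (i + 1)).takeWhile (pLine ((ayat.getD i (0, 0)).2))).length :=
      innerScan_eq ayat ((ayat.getD i (0, 0)).2) (i + 1)
    have hj : j = (i + 1) + ((ayat.drop (i + 1)).takeWhile (pLine (ayat[i]).2)).length := by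
      rw [hy] at hj0; exact hj0
    have htake : (ayat.drop i).take (j - i) =
        ayat[i] :: (ayat.drop (i + 1)).takeWhile (pLine (ayat[i]).2) := by
      rw [hdrop]
      have : j - i = ((ayat.drop (i + 1)).takeWhile (pLine (ayat[i]).2)).length + 1 := by omega
      rw [this, List.take_succ_cons, take_len_takeWhile]
    have hdropj : ayat.drop j = (ayat.drop (i + 1)).dropWhile (pLine (ayat[i]).2) := by
      rw [← drop_len_takeWhile (pLine (ayat[i]).2) (ayat.drop (i + 1)), List.drop_drop]
      congr 1
    rw [htake, hdropj]
    conv_rhs => rw [hdrop, spanRec]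
    simp [pvFlush]
  | case2 i result h =>
    rw [List.drop_eq_nil_of_le (by omega), spanRec.eq_def]
    simp

-- A's loop with a nonempty buffer whose first element's y is the current line's y
theorem processLoop_eq (rest : List (Int × Int)) :
    ∀ (result cur : List (Int × Int)), cur ≠ [] →
    processLoop rest result (cur.headI).2 cur =
      result ++ pvFlush (cur ++ rest.takeWhile (pLine (cur.headI).2))
             ++ spanRec (rest.dropWhile (pLine (cur.headI).2)) := by
  induction rest with
  | nil =>
    intro result cur _
    simp [processLoop, spanRec]
  | cons a rest ih =>
    intro result cur hcur
    simp only [processLoop, List.takeWhile_cons, List.dropWhile_cons]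
    by_cases h : |a.2 - (cur.headI).2| < 20
    · have hp : pLine (cur.headI).2 a = true := by simp [pLine, h]
      have hhead : ((cur ++ [a]).headI).2 = (cur.headI).2 := by
        cases cur with
        | nil => exact absurd rfl hcur
        | cons c cs => simp
      rw [if_pos h, hp]
      have := ih result (cur ++ [a]) (by simp)
      rw [hhead] at this
      rw [this]
      simp
    · have hp : pLine (cur.headI).2 a = false := by simp [pLine, h]
      rw [if_neg h, hp]
      have ha : a.2 = (([a] : List (Int × Int)).headI).2 := by simp
      rw [ha, ih (result ++ pvFlush cur) [a] (by simp)]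
      conv_rhs => rw [spanRec.eq_def]
      simp

-- ===== VERDICT (by name: the statement is the Claim_ definition above) =====
theorem process_spec : Claim_equal_process := by
  intro ayat _ hpre
  unfold Spec_process process process_alt
  cases ayat with
  | nil => exact absurd rfl hpre
  | cons a0 t =>
    rw [outerLoop_eq]
    simp only [List.drop_zero, List.nil_append]
    have h0 : |a0.2 - a0.2| < 20 := by simp
    simp only [processLoop, h0, if_pos, List.nil_append]
    have := processLoop_eq t [] [a0] (by simp)
    simp only [List.headI] at this
    rw [this, spanRec]
    simp
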